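-- pv_equiv track=rewrite | github.com/RanMo1990/ChatTogether-with-Neo4j-Memory-and-Lightweight-RAG | 6.0_multi_character_chatbot_ChatTogether_Director.py | silence_ages
-- ===== SOURCE A (Python) =====
-- from typing import List, Dict, Optional
--
-- def silence_ages(chat_history: List[Dict], names: List[str]) -> Dict[str, int]:
--     last_pos = {n: None for n in names}
--     for idx in range(len(chat_history) - 1, -1, -1):
--         r = chat_history[idx].get("role")
--         if r in last_pos and last_pos[r] is None:
--             last_pos[r] = idx
--         if all(v is not None for v in last_pos.values()):
--             break
--     ages = {}
--     L = len(chat_history)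
--     for n in names:
--         ages[n] = (L - 1 - last_pos[n]) if last_pos[n] is not None else (L + 1)
--     return ages
-- ===== SOURCE B (Python) =====
-- def silence_ages(chat_history, names):
--     L = len(chat_history)
--     ages = {}
--     for n in names:
--         if n in ages:
--             continue
--         age = L + 1
--         for idx in range(L - 1, -1, -1):
--             if chat_history[idx].get("role") == n:
--                 age = L - 1 - idx
--                 break
--         ages[n] = age
--     return ages
-- ===== Notes on version B (the rewrite author's own statement) =====
-- stated objective: alternative
-- what changed: Replaces A's single backward pass that fills a shared last_pos dict (with an all-found early break) by an independent backward scan per name that stops at that name's last occurrence, so no position dict is built at all.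
import Mathlib
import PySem

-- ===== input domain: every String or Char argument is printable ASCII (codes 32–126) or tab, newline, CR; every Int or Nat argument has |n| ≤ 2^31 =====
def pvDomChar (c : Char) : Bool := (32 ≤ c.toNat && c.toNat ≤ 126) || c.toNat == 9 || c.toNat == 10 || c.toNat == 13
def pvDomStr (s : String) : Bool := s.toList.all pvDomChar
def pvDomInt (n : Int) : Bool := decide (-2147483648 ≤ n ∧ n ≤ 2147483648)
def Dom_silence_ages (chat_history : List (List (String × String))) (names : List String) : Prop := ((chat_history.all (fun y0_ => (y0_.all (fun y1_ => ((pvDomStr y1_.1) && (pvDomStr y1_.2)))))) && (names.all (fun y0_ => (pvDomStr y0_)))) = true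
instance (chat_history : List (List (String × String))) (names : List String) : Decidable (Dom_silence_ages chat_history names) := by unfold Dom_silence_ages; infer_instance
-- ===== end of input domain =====

-- B replaces A's single backward pass filling a shared last_pos dict (with an early break)
-- by an independent backward scan per name; same return value, alternative decomposition.

-- ===== PORT A =====
-- chat_history[idx].get("role")
def pvRoleA (ch : List (List (String × String))) (idx : Int) : Option String :=
  match PySem.List.pyGet? ch idx with
  | some m => (PySem.Dict.mk m).get? "role"
  | none => none

-- the 'for idx in range(len-1,-1,-1)' loop with its early break
def silenceLoopA (ch : List (List (String × String))) :
    List Int → PySem.Dict String (Option Int) → PySem.Dict String (Option Int)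
  | [], d => d
  | idx :: rest, d =>
    let d' :=
      match pvRoleA ch idx with
      | some r => if d.get? r = some none then d.insert r (some idx) else d
      | none => d
    if d'.values.all (·.isSome) then d' else silenceLoopA ch rest d'

def silence_ages (chat_history : List (List (String × String))) (names : List String) : List (String × Int) :=
  let last_pos0 : PySem.Dict String (Option Int) :=
    names.foldl (fun d n => d.insert n none) PySem.Dict.empty
  let last_pos := silenceLoopA chat_history
    (PySem.List.pyRange ((chat_history.length : Int) - 1) (-1) (-1)) last_pos0
  let L : Int := chat_history.length
  (names.foldl (fun ages n =>
      ages.insert n (match last_pos.getD n none with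
        | some p => L - 1 - p
        | none => L + 1)) (PySem.Dict.empty : PySem.Dict String Int)).items

-- ===== PORT B =====
-- chat_history[idx].get("role")
def pvRoleB (ch : List (List (String × String))) (idx : Int) : Option String :=
  match PySem.List.pyGet? ch idx with
  | some m => (PySem.Dict.mk m).get? "role"
  | none => none

-- B's inner backward scan: first idx (from the back) whose role is n, else age stays L+1
def silenceFindB (ch : List (List (String × String))) (n : String) (L : Int) :
    List Int → Int
  | [] => L + 1
  | idx :: rest =>
    if pvRoleB ch idx = some n then L - 1 - idx else silenceFindB ch n L rest

def silence_ages_alt (chat_history : List (List (String × String))) (names : List String) : List (String × Int) :=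
  let L : Int := chat_history.length
  (names.foldl (fun ages n =>
      if ages.contains n then ages
      else ages.insert n (silenceFindB chat_history n L (PySem.List.pyRange (L - 1) (-1) (-1))))
    (PySem.Dict.empty : PySem.Dict String Int)).items

-- ===== PRECONDITION & SPEC =====
def Spec_silence_ages (chat_history : List (List (String × String))) (names : List String) (out : List (String × Int)) : Prop := out = silence_ages_alt chat_history names
instance (chat_history : List (List (String × String))) (names : List String) (out : List (String × Int)) : Decidable (Spec_silence_ages chat_history names out) := by unfold Spec_silence_ages; infer_instance

-- ===== CLAIM (what is proved, stated in full; the proofs are below) =====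
def Claim_equal_silence_ages : Prop := ∀ (chat_history : List (List (String × String))) (names : List String), Dom_silence_ages chat_history names → Spec_silence_ages chat_history names (silence_ages chat_history names)

-- ===== LEMMAS AND PROOFS =====

-- the age a name gets: from the last index (scanning back) whose role equals n
def pvAge (ch : List (List (String × String))) (idxs : List Int) (n : String) : Int :=
  match idxs.find? (fun i => pvRoleA ch i == some n) with
  | some i => (ch.length : Int) - 1 - i
  | none => (ch.length : Int) + 1

theorem pvRoleB_eq_pvRoleA : pvRoleB = pvRoleA := rfl

theorem silenceFindB_eq (ch : List (List (String × String))) (n : String)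
    (idxs : List Int) :
    silenceFindB ch n (ch.length : Int) idxs = pvAge ch idxs n := by
  induction idxs with
  | nil => simp [silenceFindB, pvAge]
  | cons idx rest ih =>
    simp only [silenceFindB, pvRoleB_eq_pvRoleA, pvAge, List.find?_cons]
    by_cases h : pvRoleA ch idx = some n
    · simp [h]
    · simp only [h, if_false]
      have hb : (pvRoleA ch idx == some n) = false := by simpa using h
      simp only [hb]
      exact ih

theorem mem_values_of_get? {κ ν : Type} [BEq κ] [LawfulBEq κ] (d : PySem.Dict κ ν) (k : κ) (v : ν)
    (h : d.get? k = some v) : v ∈ d.values := by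
  have := PySem.Dict.mem_items_of_get?_eq_some (d := d) (k := k) (v := v) h
  simp only [PySem.Dict.values]
  exact List.mem_map.mpr ⟨(k, v), this, rfl⟩

theorem silenceLoopA_get? (ch : List (List (String × String))) (idxs : List Int)
    (d : PySem.Dict String (Option Int)) (n : String) :
    (silenceLoopA ch idxs d).get? n =
      match d.get? n with
      | none => none
      | some (some i) => some (some i)
      | some none => some (idxs.find? (fun i => pvRoleA ch i == some n)) := by
  induction idxs generalizing d with
  | nil => cases h : d.get? n with
    | none => simp [silenceLoopA, h]
    | some v => cases v <;> simp [silenceLoopA, h]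
  | cons idx rest ih =>
    simp only [silenceLoopA]
    set d' := (match pvRoleA ch idx with
      | some r => if d.get? r = some none then d.insert r (some idx) else d
      | none => d) with hd'
    have hget : d'.get? n =
        if pvRoleA ch idx = some n ∧ d.get? n = some none then some (some idx)
        else d.get? n := by
      rw [hd']
      cases hr : pvRoleA ch idx with
      | none => simp
      | some r =>
        dsimp only
        by_cases hn : r = n
        · rw [hn]
          by_cases hc : d.get? n = some none
          · rw [if_pos hc, if_pos ⟨rfl, hc⟩, PySem.Dict.get?_insert_self]
          · rw [if_neg hc, if_neg (fun h => hc h.2)]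
        · by_cases hc : d.get? r = some none
          · rw [if_pos hc, if_neg (fun h => hn (Option.some.inj h.1)),
              PySem.Dict.get?_insert_of_ne _ _ (fun h => hn h.symm)]
          · rw [if_neg hc, if_neg (fun h => hn (Option.some.inj h.1))]
    have hfind : List.find? (fun i => pvRoleA ch i == some n) (idx :: rest) =
        if pvRoleA ch idx = some n then some idx
        else List.find? (fun i => pvRoleA ch i == some n) rest := by
      rw [List.find?_cons]
      by_cases hrn : pvRoleA ch idx = some n
      · simp [hrn]
      · have hb2 : (pvRoleA ch idx == some n) = false := by simpa using hrn
        simp [hrn, hb2]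
    by_cases hb : d'.values.all (·.isSome) = true
    · rw [if_pos hb]
      cases h : d.get? n with
      | none => simp [hget, h]
      | some v => cases v with
        | some i => simp [hget, h]
        | none =>
          by_cases hrn : pvRoleA ch idx = some n
          · simp [hget, h, hrn, hfind]
          · exfalso
            have hdn : d'.get? n = some none := by
              rw [hget, if_neg (fun hh => hrn hh.1)]; exact h
            have hmem := mem_values_of_get? d' n none hdn
            have := List.all_eq_true.mp hb _ hmem
            simp at this
    · rw [if_neg hb, ih d']
      cases h : d.get? n with
      | none => simp [hget, h]
      | some v => cases v with
        | some i => simp [hget, h]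
        | none =>
          by_cases hrn : pvRoleA ch idx = some n
          · simp [hget, h, hrn, hfind]
          · simp [hget, h, hrn, hfind]

theorem init_get? (names : List String) (d : PySem.Dict String (Option Int)) (n : String) :
    (names.foldl (fun d n => d.insert n none) d).get? n =
      if n ∈ names then some none else d.get? n := by
  induction names generalizing d with
  | nil => simp
  | cons m rest ih =>
    simp only [List.foldl_cons, ih, List.mem_cons]
    by_cases h : n ∈ rest
    · simp [h]
    · by_cases hm : n = m
      · subst hm; simp [h, PySem.Dict.get?_insert_self]
      · simp [h, hm, PySem.Dict.get?_insert_of_ne _ _ hm]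

-- overwrite-with-same-value fold = skip-if-present fold
theorem fold_insert_eq_fold_skip (f : String → Int) (names : List String)
    (d : PySem.Dict String Int) (hnd : d.keys.Nodup)
    (hv : ∀ k v, d.get? k = some v → v = f k) :
    names.foldl (fun a n => a.insert n (f n)) d =
      names.foldl (fun a n => if a.contains n then a else a.insert n (f n)) d := by
  induction names generalizing d with
  | nil => rfl
  | cons n rest ih =>
    simp only [List.foldl_cons]
    by_cases hc : d.contains n = true
    · have hid : d.insert n (f n) = d := by
        apply PySem.Dict.ext
        rw [PySem.Dict.items_insert, if_pos hc]
        conv_rhs => rw [← List.map_id d.items]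
        apply List.map_congr_left
        intro p hp
        obtain ⟨p1, p2⟩ := p
        by_cases hpn : p1 = n
        · subst hpn
          have hv2 : d.get? p1 = some p2 :=
            PySem.Dict.get?_of_mem_items _ hp hnd
          have hval : p2 = f p1 := hv _ _ hv2
          simp [hval]
        · simp [hpn]
      rw [if_pos hc, hid]
      exact ih d hnd hv
    · rw [if_neg hc]
      apply ih
      · exact PySem.Dict.nodup_keys_insert _ _ _ hnd
      · intro k v hk
        by_cases hkn : k = n
        · subst hkn
          rw [PySem.Dict.get?_insert_self] at hk
          exact (Option.some.inj hk).symm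
        · rw [PySem.Dict.get?_insert_of_ne _ _ hkn] at hk
          exact hv k v hk

theorem silence_ages_eq (ch : List (List (String × String))) (names : List String) :
    silence_ages ch names = silence_ages_alt ch names := by
  simp only [silence_ages, silence_ages_alt]
  set L : Int := (ch.length : Int) with hL
  set idxs := PySem.List.pyRange (L - 1) (-1) (-1) with hidxs
  set last_pos := silenceLoopA ch idxs
    (names.foldl (fun d n => d.insert n none) PySem.Dict.empty) with hlp
  have hA : ∀ n ∈ names,
      (match last_pos.getD n none with
        | some p => L - 1 - p
        | none => L + 1) = pvAge ch idxs n := by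
    intro n hn
    have hg : last_pos.get? n = some (idxs.find? (fun i => pvRoleA ch i == some n)) := by
      rw [hlp, silenceLoopA_get?, init_get?]
      simp [hn]
    have hgd : last_pos.getD n none = idxs.find? (fun i => pvRoleA ch i == some n) :=
      PySem.Dict.getD_of_get?_eq_some _ _ hg
    rw [hgd, pvAge, hL]
  have hB : ∀ n, silenceFindB ch n L idxs = pvAge ch idxs n := fun n => by
    rw [hL]; exact silenceFindB_eq ch n idxs
  congr 1
  calc names.foldl (fun ages n => ages.insert n
          (match last_pos.getD n none with
            | some p => L - 1 - p
            | none => L + 1)) PySem.Dict.empty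
      = names.foldl (fun ages n => ages.insert n (pvAge ch idxs n)) PySem.Dict.empty := by
        apply PySem.List.foldl_congr_mem
        intro acc x hx
        rw [hA x hx]
    _ = names.foldl (fun ages n => if ages.contains n then ages
          else ages.insert n (pvAge ch idxs n)) PySem.Dict.empty := by
        apply fold_insert_eq_fold_skip
        · simp [PySem.Dict.keys_empty]
        · intro k v hk
          simp [PySem.Dict.get?_empty] at hk
    _ = names.foldl (fun ages n => if ages.contains n then ages
          else ages.insert n (silenceFindB ch n L idxs)) PySem.Dict.empty := by
        apply PySem.List.foldl_congr_mem
        intro acc x _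
        rw [hB x]

-- ===== VERDICT (by name: the statement is the Claim_ definition above) =====
theorem silence_ages_spec : Claim_equal_silence_ages := by
  intro ch names _
  unfold Spec_silence_ages
  exact silence_ages_eq ch names
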